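-- pv_equiv track=rewrite | github.com/arin17bishwa/myCP_sols | CF/1360D.py | func
-- ===== SOURCE A (Python) =====
-- from math import sqrt
--
-- def func(n, k):
--     if k >= n:
--         return 1
--     x = int(sqrt(n))
--     high = min(x + 1, k)
--     ans = n
--     for i in range(high, 0, -1):
--         if n % i == 0:
--             p = n // i
--             if p <= k:
--                 ans = min(ans, p, i)
--             ans = min(ans, p)
--     return ans
-- ===== SOURCE B (Python) =====
-- def func(n, k):
--     if k >= n:
--         return 1
--     # factorize n into prime powers by trial division on a shrinking m
--     pf = []
--     m = n
--     p = 2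
--     while p * p <= m:
--         if m % p == 0:
--             e = 0
--             while m % p == 0:
--                 m //= p
--                 e += 1
--             pf.append((p, e))
--         p += 1
--     if m > 1:
--         pf.append((m, 1))
--     # generate every divisor of n as a product of prime powers
--     divs = [1]
--     for p, e in pf:
--         divs = [d * p ** i for d in divs for i in range(e + 1)]
--     # the answer is n divided by the largest divisor not exceeding k (1 always works)
--     best = 1
--     for d in divs:
--         if best < d <= k:
--             best = d
--     return n // best
-- ===== Notes on version B (the rewrite author's own statement) =====
-- stated objective: alternative
-- what changed: A minimizes n//i inline during one descending scan over candidate small divisors; B first computes the prime factorization of n (trial division on a shrinking m), then generates the complete divisor set as products of prime powers, and finally returns n divided by the largest generated divisor <= k.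
import Mathlib
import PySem

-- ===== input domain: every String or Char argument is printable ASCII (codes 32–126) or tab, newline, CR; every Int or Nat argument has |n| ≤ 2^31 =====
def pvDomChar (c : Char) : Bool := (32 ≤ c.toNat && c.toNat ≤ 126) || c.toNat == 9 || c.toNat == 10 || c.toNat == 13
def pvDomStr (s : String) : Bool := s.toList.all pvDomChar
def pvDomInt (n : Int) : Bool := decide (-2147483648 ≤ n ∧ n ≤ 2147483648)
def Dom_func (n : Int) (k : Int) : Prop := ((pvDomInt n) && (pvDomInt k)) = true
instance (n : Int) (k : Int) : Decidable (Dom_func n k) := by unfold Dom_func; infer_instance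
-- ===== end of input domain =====

-- B replaces A's single descending min-scan by a three-phase algorithm: prime factorization of n
-- by trial division on a shrinking m, generation of the complete divisor set as products of prime
-- powers, and a final reduce taking n // (largest generated divisor <= k) ("alternative").

-- ===== PORT A =====
-- int(math.sqrt(n)) is ported as Int.sqrt n: exact for 0 <= n <= 2^31 (double sqrt is correctly
-- rounded, and at this magnitude the distance to the nearest square exceeds the rounding error).
def func (n : Int) (k : Int) : Int :=
  if k ≥ n then 1
  else
    let x : Int := Int.sqrt n
    let high : Int := min (x + 1) k
    (PySem.List.pyRange high 0 (-1)).foldl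
      (fun ans i =>
        if PySem.Int.mod n i = 0 then
          let p := PySem.Int.floordiv n i
          let ans1 := if p ≤ k then min (min ans p) i else ans
          min ans1 p
        else ans) n

-- ===== PORT B =====
-- the inner 'while m % p == 0' loop; fuel only makes the recursion structural (m.toNat steps
-- always suffice since m shrinks), the 0 < m ∧ 2 ≤ p guard holds at every call site
def divideOut : Nat → Int → Int → Int × Int
  | 0, m, _ => (m, 0)
  | fuel + 1, m, p =>
    if 0 < m ∧ 2 ≤ p ∧ PySem.Int.mod m p = 0 then
      let r := divideOut fuel (PySem.Int.floordiv m p) p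
      (r.1, r.2 + 1)
    else (m, 0)

-- the outer 'while p * p <= m' loop; fuel only makes the recursion structural
-- ((m + 1 - p).toNat < fuel always holds at the call sites, see factorLoop_spec below)
def factorLoop : Nat → Int → Int → List (Int × Int) × Int
  | 0, m, _ => ([], m)
  | fuel + 1, m, p =>
    if p * p ≤ m then
      if PySem.Int.mod m p = 0 then
        let r := divideOut m.toNat m p
        let rest := factorLoop fuel r.1 (p + 1)
        ((p, r.2) :: rest.1, rest.2)
      else factorLoop fuel m (p + 1)
    else ([], m)

def func_alt (n : Int) (k : Int) : Int :=
  if k ≥ n then 1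
  else
    let fr := factorLoop (n + 1).toNat n 2
    let pf := if fr.2 > 1 then fr.1 ++ [(fr.2, 1)] else fr.1
    -- Python's p ** i with i drawn from range(e + 1): i ≥ 0, so Int pow on i.toNat is exact
    let divs := pf.foldl
      (fun divs pe => divs.flatMap
        (fun d => (PySem.List.pyRange 0 (pe.2 + 1) 1).map (fun i => d * pe.1 ^ i.toNat))) [1]
    let best := divs.foldl (fun best d => if best < d ∧ d ≤ k then d else best) 1
    PySem.Int.floordiv n best

-- ===== PRECONDITION & SPEC =====
-- Pre_ excludes only n < 0 with k < n, where A's math.sqrt raises ValueError.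
def Pre_func (n : Int) (k : Int) : Prop := 0 ≤ n ∨ n ≤ k
instance (n : Int) (k : Int) : Decidable (Pre_func n k) := by unfold Pre_func; infer_instance
def pvWitness_func : Int × Int := (12, 4)

def Spec_func (n : Int) (k : Int) (out : Int) : Prop := out = func_alt n k
instance (n : Int) (k : Int) (out : Int) : Decidable (Spec_func n k out) := by unfold Spec_func; infer_instance

-- ===== CLAIM (what is proved, stated in full; the proofs are below) =====
def Claim_equal_func : Prop := ∀ (n : Int) (k : Int), Dom_func n k → Pre_func n k → Spec_func n k (func n k)
-- ===== LEMMAS AND PROOFS =====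

-- `bestD n k` — the largest divisor of n not exceeding k, defaulting to 1 — is the common
-- characterisation both programs are proved equal to: each returns n / bestD n k.
def bestD (n k : Int) : Int :=
  max 1 ((Nat.findGreatest (fun d => (d : Int) ∣ n ∧ (d : Int) ≤ k) n.toNat : Nat) : Int)

-- q has no divisor in [2, q): the primality notion the trial-division invariant yields
def IsPrimeInt (q : Int) : Prop := 2 ≤ q ∧ ∀ r : Int, 2 ≤ r → r < q → ¬ r ∣ q

def prodPF (pf : List (Int × Int)) : Int := (pf.map (fun pe => pe.1 ^ pe.2.toNat)).prod

-- d is a product of per-pair powers pe.1 ^ i with 0 ≤ i ≤ pe.2 — what B's generation loop emits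
def Gen : List (Int × Int) → Int → Prop
  | [], d => d = 1
  | pe :: t, d => ∃ g, Gen t g ∧ ∃ i : Int, 0 ≤ i ∧ i ≤ pe.2 ∧ d = g * pe.1 ^ i.toNat

def GoodPF (pf : List (Int × Int)) : Prop :=
  (∀ pe ∈ pf, IsPrimeInt pe.1 ∧ 0 ≤ pe.2) ∧ List.Pairwise (fun a b => a.1 ≠ b.1) pf

-- Int.sqrt upper bound for nonnegative arguments
theorem lt_succ_sqrt_sq (n : Int) (hn : 0 ≤ n) : n < (Int.sqrt n + 1) * (Int.sqrt n + 1) := by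
  have h := Nat.lt_succ_sqrt' n.toNat
  rw [pow_two] at h
  have : ((n.toNat : Nat) : Int) < ((n.toNat.sqrt.succ * n.toNat.sqrt.succ : Nat) : Int) := by
    exact_mod_cast h
  rw [Int.toNat_of_nonneg hn] at this
  push_cast at this
  simpa [Int.sqrt] using this

-- a foldl of min is bounded by the seed …
theorem minFold_le_seed (L : List Int) (n : Int) : L.foldl min n ≤ n := by
  induction L generalizing n with
  | nil => simp
  | cons b t ih => exact le_trans (ih (min n b)) (min_le_left _ _)

-- … and by every element …
theorem minFold_le_mem : ∀ (L : List Int) (n a : Int), a ∈ L → L.foldl min n ≤ a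
  | b :: t, n, a, h => by
    rcases List.mem_cons.mp h with rfl | h
    · exact le_trans (minFold_le_seed t (min n a)) (min_le_right _ _)
    · exact minFold_le_mem t (min n b) a h

-- … and is attained at the seed or at an element
theorem minFold_mem (L : List Int) (n : Int) : L.foldl min n ∈ n :: L := by
  induction L generalizing n with
  | nil => simp
  | cons b t ih =>
    rcases List.mem_cons.mp (ih (min n b)) with h | h
    · rcases min_choice n b with hc | hc <;> rw [List.foldl_cons, h, hc] <;> simp
    · rw [List.foldl_cons]
      exact List.mem_cons_of_mem _ (List.mem_cons_of_mem _ h)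

-- pointwise-equal step functions fold alike
theorem foldl_ext' (f g : Int → Int → Int) (h : ∀ a b, f a b = g a b) :
    ∀ (L : List Int) (a : Int), L.foldl f a = L.foldl g a
  | [], _ => rfl
  | b :: t, a => by rw [List.foldl_cons, List.foldl_cons, h, foldl_ext' f g h t]

-- a fold whose step min-folds per-index contributions is a min-fold over the flatMap
theorem foldl_minFold (c : Int → List Int) (L : List Int) (a : Int) :
    L.foldl (fun ans i => (c i).foldl min ans) a = (L.flatMap c).foldl min a := by
  induction L generalizing a with
  | nil => simp
  | cons b t ih => simp [List.foldl_append, ih]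

-- per-iteration contribution of A's loop
def contribA (n k i : Int) : List Int :=
  if PySem.Int.mod n i = 0 then
    (if PySem.Int.floordiv n i ≤ k then [PySem.Int.floordiv n i, i, PySem.Int.floordiv n i]
     else [PySem.Int.floordiv n i])
  else []

theorem mem_contribA (n k i a : Int) :
    a ∈ contribA n k i ↔ PySem.Int.mod n i = 0 ∧
      (a = PySem.Int.floordiv n i ∨ (PySem.Int.floordiv n i ≤ k ∧ a = i)) := by
  unfold contribA
  split_ifs with h1 h2 <;> (simp_all; try tauto)

theorem func_eq_minFold (n k : Int) (h : ¬ k ≥ n) :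
    func n k = ((PySem.List.pyRange (min (Int.sqrt n + 1) k) 0 (-1)).flatMap
      (contribA n k)).foldl min n := by
  rw [func, if_neg h, ← foldl_minFold]
  show (PySem.List.pyRange (min (Int.sqrt n + 1) k) 0 (-1)).foldl
      (fun ans i =>
        if PySem.Int.mod n i = 0 then
          min (if PySem.Int.floordiv n i ≤ k
               then min (min ans (PySem.Int.floordiv n i)) i else ans)
            (PySem.Int.floordiv n i)
        else ans) n
    = (PySem.List.pyRange (min (Int.sqrt n + 1) k) 0 (-1)).foldl
        (fun ans i => (contribA n k i).foldl min ans) n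
  apply foldl_ext'
  intro ans i
  unfold contribA
  split_ifs <;> simp [List.foldl]

-- ----- bestD facts -----

theorem bestD_pos (n k : Int) : 1 ≤ bestD n k := le_max_left _ _

theorem bestD_dvd (n k : Int) (_hn : 0 < n) : bestD n k ∣ n := by
  unfold bestD
  rcases Nat.eq_zero_or_pos (Nat.findGreatest (fun d => (d : Int) ∣ n ∧ (d : Int) ≤ k) n.toNat) with h | h
  · rw [h]; simp
  · have hs : ((Nat.findGreatest (fun d => (d : Int) ∣ n ∧ (d : Int) ≤ k) n.toNat : Nat) : Int) ∣ n ∧ ((Nat.findGreatest (fun d => (d : Int) ∣ n ∧ (d : Int) ≤ k) n.toNat : Nat) : Int) ≤ k := by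
      have h' := (Nat.findGreatest_eq_iff (P := fun d => (d : Int) ∣ n ∧ (d : Int) ≤ k)
        (k := n.toNat) (m := Nat.findGreatest (fun d => (d : Int) ∣ n ∧ (d : Int) ≤ k) n.toNat)).1 rfl
      exact h'.2.1 (by omega)
    have : (1 : Int) ≤ ((Nat.findGreatest (fun d => (d : Int) ∣ n ∧ (d : Int) ≤ k) n.toNat : Nat) : Int) := by
      exact_mod_cast h
    rw [max_eq_right this]
    exact hs.1

theorem bestD_le_k_or_one (n k : Int) : bestD n k = 1 ∨ bestD n k ≤ k := by
  unfold bestD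
  rcases Nat.eq_zero_or_pos (Nat.findGreatest (fun d => (d : Int) ∣ n ∧ (d : Int) ≤ k) n.toNat) with h | h
  · left; rw [h]; simp
  · right
    have hs : ((Nat.findGreatest (fun d => (d : Int) ∣ n ∧ (d : Int) ≤ k) n.toNat : Nat) : Int) ∣ n ∧ ((Nat.findGreatest (fun d => (d : Int) ∣ n ∧ (d : Int) ≤ k) n.toNat : Nat) : Int) ≤ k := by
      have h' := (Nat.findGreatest_eq_iff (P := fun d => (d : Int) ∣ n ∧ (d : Int) ≤ k)
        (k := n.toNat) (m := Nat.findGreatest (fun d => (d : Int) ∣ n ∧ (d : Int) ≤ k) n.toNat)).1 rfl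
      exact h'.2.1 (by omega)
    have h1 : (1 : Int) ≤ ((Nat.findGreatest (fun d => (d : Int) ∣ n ∧ (d : Int) ≤ k) n.toNat : Nat) : Int) := by
      exact_mod_cast h
    rw [max_eq_right h1]
    exact hs.2

theorem bestD_ge (n k d : Int) (hn : 0 < n) (hd : 0 < d) (hdvd : d ∣ n) (hdk : d ≤ k) :
    d ≤ bestD n k := by
  have hle : d ≤ n := Int.le_of_dvd hn hdvd
  have h1 : d.toNat ≤ n.toNat := by omega
  have h2 : ((d.toNat : Nat) : Int) = d := by omega
  have := Nat.le_findGreatest (P := fun d => (d : Int) ∣ n ∧ (d : Int) ≤ k) h1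
    (by show ((d.toNat : Nat) : Int) ∣ n ∧ ((d.toNat : Nat) : Int) ≤ k; rw [h2]; exact ⟨hdvd, hdk⟩)
  unfold bestD
  have : ((d.toNat : Nat) : Int) ≤ ((Nat.findGreatest (fun d => (d : Int) ∣ n ∧ (d : Int) ≤ k) n.toNat : Nat) : Int) := by exact_mod_cast this
  omega

-- ----- A's side: the min-fold equals n / bestD n k -----

theorem A_eq_div (n k : Int) (hn : 1 ≤ n) (hkn : k < n) : func n k = n / bestD n k := by
  have h := func_eq_minFold n k (by omega)
  have hx0 : 0 ≤ Int.sqrt n := Int.sqrt_nonneg n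
  have hxu : n < (Int.sqrt n + 1) * (Int.sqrt n + 1) := lt_succ_sqrt_sq n (by omega)
  have hD1 : 1 ≤ bestD n k := bestD_pos n k
  have hDdvd : bestD n k ∣ n := bestD_dvd n k (by omega)
  have hDc : n / bestD n k * bestD n k = n := Int.ediv_mul_cancel hDdvd
  have hq1 : 1 ≤ n / bestD n k := by nlinarith
  -- every element A's loop mins in is at least n / bestD n k
  have hlow : ∀ a ∈ (PySem.List.pyRange (min (Int.sqrt n + 1) k) 0 (-1)).flatMap (contribA n k),
      n / bestD n k ≤ a := by
    intro a ha
    rw [List.mem_flatMap] at ha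
    obtain ⟨i, hir, hca⟩ := ha
    rw [PySem.List.mem_pyRange_neg_one] at hir
    obtain ⟨hi0, hih⟩ := hir
    rw [mem_contribA] at hca
    obtain ⟨hm, hcase⟩ := hca
    have hdvd : i ∣ n := (PySem.Int.mod_eq_zero_iff_dvd n i).mp hm
    have hik : i ≤ k := le_trans hih (min_le_right _ _)
    have hfd : PySem.Int.floordiv n i = n / i := PySem.Int.floordiv_eq_ediv_of_pos hi0
    have hpi : n / i * i = n := Int.ediv_mul_cancel hdvd
    have hp1 : 1 ≤ n / i := by nlinarith
    have hiD : i ≤ bestD n k := bestD_ge n k i (by omega) hi0 hdvd hik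
    rcases hcase with rfl | ⟨hpk, hai⟩
    · -- the element is n // i
      rw [hfd]
      have h1 : n / i * i ≤ n / i * bestD n k := mul_le_mul_of_nonneg_left hiD (by omega)
      have h2 : n / bestD n k * bestD n k ≤ n / i * bestD n k := by omega
      exact le_of_mul_le_mul_right h2 (by omega)
    · -- the element is i itself (with n // i ≤ k)
      rw [hai, hfd] at *
      have hpdvd : n / i ∣ n := ⟨i, hpi.symm⟩
      have hpD : n / i ≤ bestD n k := bestD_ge n k (n / i) (by omega) (by omega) hpdvd hpk
      have h1 : n / i * i ≤ bestD n k * i := mul_le_mul_of_nonneg_right hpD (by omega)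
      have h2 : n / bestD n k * bestD n k ≤ i * bestD n k := by rw [mul_comm i (bestD n k)]; omega
      exact le_of_mul_le_mul_right h2 (by omega)
  have hseed : n / bestD n k ≤ n := Int.ediv_le_self (bestD n k) (by omega)
  -- n / bestD n k appears as the seed or in the list
  have hmem : n / bestD n k ∈
      n :: (PySem.List.pyRange (min (Int.sqrt n + 1) k) 0 (-1)).flatMap (contribA n k) := by
    rcases eq_or_lt_of_le hD1 with hD1' | hD2
    · rw [← hD1', Int.ediv_one]
      exact List.mem_cons_self
    · have hDk : bestD n k ≤ k := by
        rcases bestD_le_k_or_one n k with h1 | h1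
        · omega
        · exact h1
      apply List.mem_cons_of_mem
      rw [List.mem_flatMap]
      by_cases hDx : bestD n k ≤ Int.sqrt n + 1
      · refine ⟨bestD n k, ?_, ?_⟩
        · rw [PySem.List.mem_pyRange_neg_one]
          exact ⟨by omega, le_min hDx hDk⟩
        · rw [mem_contribA]
          refine ⟨(PySem.Int.mod_eq_zero_iff_dvd n (bestD n k)).mpr hDdvd, Or.inl ?_⟩
          rw [PySem.Int.floordiv_eq_ediv_of_pos (by omega)]
      · -- bestD n k exceeds the root: its cofactor n / bestD n k is in range
        have hcx : n / bestD n k ≤ Int.sqrt n := by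
          nlinarith [mul_le_mul_of_nonneg_left (show Int.sqrt n + 2 ≤ bestD n k by omega)
            (show (0 : Int) ≤ n / bestD n k by omega)]
        have hcD : n / bestD n k < bestD n k := by omega
        refine ⟨n / bestD n k, ?_, ?_⟩
        · rw [PySem.List.mem_pyRange_neg_one]
          exact ⟨by omega, le_min (by omega) (by omega)⟩
        · rw [mem_contribA]
          have hcdvd : n / bestD n k ∣ n := ⟨bestD n k, hDc.symm⟩
          have hfdc : PySem.Int.floordiv n (n / bestD n k) = bestD n k := by
            rw [PySem.Int.floordiv_eq_ediv_of_pos (by omega)]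
            exact Int.ediv_eq_of_eq_mul_left (by omega) (by linarith [hDc])
          exact ⟨(PySem.Int.mod_eq_zero_iff_dvd n (n / bestD n k)).mpr hcdvd,
            Or.inr ⟨by rw [hfdc]; exact hDk, rfl⟩⟩
  rw [h]
  apply le_antisymm
  · rcases List.mem_cons.mp hmem with h1 | h1
    · rw [h1]
      exact minFold_le_seed _ _
    · exact minFold_le_mem _ _ _ h1
  · rcases List.mem_cons.mp (minFold_mem
      ((PySem.List.pyRange (min (Int.sqrt n + 1) k) 0 (-1)).flatMap (contribA n k)) n) with h1 | h1
    · rw [h1]; exact hseed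
    · exact hlow _ h1

-- ----- B's side -----

theorem divideOut_succ_pos (fuel : Nat) (m p : Int)
    (h : 0 < m ∧ 2 ≤ p ∧ PySem.Int.mod m p = 0) :
    divideOut (fuel + 1) m p =
      ((divideOut fuel (PySem.Int.floordiv m p) p).1,
       (divideOut fuel (PySem.Int.floordiv m p) p).2 + 1) := by
  rw [divideOut, if_pos h]

theorem factorLoop_succ_div (fuel : Nat) (m p : Int)
    (hc : p * p ≤ m) (hm : PySem.Int.mod m p = 0) :
    factorLoop (fuel + 1) m p =
      ((p, (divideOut m.toNat m p).2) :: (factorLoop fuel (divideOut m.toNat m p).1 (p + 1)).1,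
       (factorLoop fuel (divideOut m.toNat m p).1 (p + 1)).2) := by
  rw [factorLoop, if_pos hc, if_pos hm]

theorem factorLoop_succ_nodiv (fuel : Nat) (m p : Int)
    (hc : p * p ≤ m) (hm : ¬ PySem.Int.mod m p = 0) :
    factorLoop (fuel + 1) m p = factorLoop fuel m (p + 1) := by
  rw [factorLoop, if_pos hc, if_neg hm]

theorem factorLoop_succ_exit (fuel : Nat) (m p : Int) (hc : ¬ p * p ≤ m) :
    factorLoop (fuel + 1) m p = ([], m) := by
  rw [factorLoop, if_neg hc]

theorem divideOut_spec (fuel : Nat) (m p : Int) (h0 : 0 < m) (h2 : 2 ≤ p)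
    (hf : m.toNat ≤ fuel) :
    0 < (divideOut fuel m p).1 ∧ m = (divideOut fuel m p).1 * p ^ (divideOut fuel m p).2.toNat ∧
    ¬ p ∣ (divideOut fuel m p).1 ∧ 0 ≤ (divideOut fuel m p).2 ∧
    (p ∣ m → 1 ≤ (divideOut fuel m p).2) := by
  induction fuel generalizing m with
  | zero => omega
  | succ fuel ih =>
    by_cases h : 0 < m ∧ 2 ≤ p ∧ PySem.Int.mod m p = 0
    · rw [divideOut_succ_pos fuel m p h]
      have hdvd : p ∣ m := (PySem.Int.mod_eq_zero_iff_dvd m p).mp h.2.2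
      have hfd : PySem.Int.floordiv m p = m / p := PySem.Int.floordiv_eq_ediv_of_pos (by omega)
      have hmp : m / p * p = m := Int.ediv_mul_cancel hdvd
      have hq0 : 0 < m / p := by
        by_contra hq
        have hq' : m / p ≤ 0 := by omega
        nlinarith
      have hlt : m / p < m := by nlinarith
      have hle : (m / p).toNat ≤ fuel := by omega
      have := ih (PySem.Int.floordiv m p) (by rw [hfd]; exact hq0) (by rw [hfd]; omega)
      rw [hfd] at this
      obtain ⟨c1, c2, c3, c4, _⟩ := this
      rw [hfd]
      have htn : ((divideOut fuel (m / p) p).2 + 1).toNat = (divideOut fuel (m / p) p).2.toNat + 1 := by omega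
      refine ⟨c1, ?_, c3, by omega, fun _ => by omega⟩
      show m = (divideOut fuel (m / p) p).1 * p ^ ((divideOut fuel (m / p) p).2 + 1).toNat
      rw [htn, pow_succ, ← mul_assoc, ← c2, hmp]
    · rw [divideOut, if_neg h]
      have hnd : ¬ p ∣ m := by
        intro hd
        exact h ⟨h0, h2, (PySem.Int.mod_eq_zero_iff_dvd m p).mpr hd⟩
      exact ⟨h0, by simp, hnd, by omega, fun hd => absurd hd hnd⟩

theorem factorLoop_spec (fuel : Nat) (m p : Int) (h1 : 1 ≤ m) (h2 : 2 ≤ p)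
    (hf : (m + 1 - p).toNat < fuel)
    (hnd : ∀ q : Int, 2 ≤ q → q < p → ¬ q ∣ m) :
    1 ≤ (factorLoop fuel m p).2 ∧
    m = (factorLoop fuel m p).2 * prodPF (factorLoop fuel m p).1 ∧
    ((factorLoop fuel m p).2 = 1 ∨ IsPrimeInt (factorLoop fuel m p).2) ∧
    (∀ pe ∈ (factorLoop fuel m p).1,
      p ≤ pe.1 ∧ 0 ≤ pe.2 ∧ IsPrimeInt pe.1 ∧ ¬ pe.1 ∣ (factorLoop fuel m p).2) ∧
    List.Pairwise (fun a b : Int × Int => a.1 < b.1) (factorLoop fuel m p).1 := by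
  induction fuel generalizing m p with
  | zero => omega
  | succ fuel ih =>
    have hpp : p ≤ p * p := by nlinarith
    by_cases hcond : p * p ≤ m
    · have hpm : p ≤ m := by omega
      by_cases hmod : PySem.Int.mod m p = 0
      · rw [factorLoop_succ_div fuel m p hcond hmod]
        have hdvd : p ∣ m := (PySem.Int.mod_eq_zero_iff_dvd m p).mp hmod
        obtain ⟨c1, c2, c3, c4, c5⟩ := divideOut_spec m.toNat m p (by omega) h2 (le_refl _)
        set m' := (divideOut m.toNat m p).1 with hm'
        set e := (divideOut m.toNat m p).2 with he
        have he1 : 1 ≤ e := c5 hdvd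
        have hpe : p ≤ p ^ e.toNat := by
          calc p = p ^ 1 := (pow_one p).symm
          _ ≤ p ^ e.toNat := pow_le_pow_right₀ (by omega) (by omega)
        have hm'le : m' < m := by nlinarith
        have hm'dvd : m' ∣ m := ⟨p ^ e.toNat, c2⟩
        have ihm := ih m' (p + 1) c1 (by omega) (by omega)
          (by
            intro q hq2 hqp hqm'
            rcases lt_or_eq_of_le (by omega : q ≤ p) with hlt | rfl
            · exact hnd q hq2 hlt (dvd_trans hqm' hm'dvd)
            · exact c3 hqm')
        set R := factorLoop fuel m' (p + 1) with hR
        obtain ⟨d1, d2, d3, d4, d5⟩ := ihm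
        have hps : IsPrimeInt p := by
          refine ⟨h2, fun r hr2 hrp hrm => ?_⟩
          exact hnd r hr2 hrp (dvd_trans hrm hdvd)
        have hmfm' : R.2 ∣ m' := ⟨prodPF R.1, d2⟩
        refine ⟨d1, ?_, d3, ?_, ?_⟩
        · show m = R.2 * prodPF ((p, e) :: R.1)
          unfold prodPF
          rw [List.map_cons, List.prod_cons]
          show m = R.2 * (p ^ e.toNat * prodPF R.1)
          calc m = m' * p ^ e.toNat := c2
          _ = (R.2 * prodPF R.1) * p ^ e.toNat := by rw [← d2]
          _ = R.2 * (p ^ e.toNat * prodPF R.1) := by ring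
        · intro pe hpe'
          rcases List.mem_cons.mp hpe' with rfl | hmem
          · exact ⟨le_refl _, by omega, hps, fun hc => c3 (dvd_trans hc hmfm')⟩
          · obtain ⟨e1, e2, e3, e4⟩ := d4 pe hmem
            exact ⟨by omega, e2, e3, e4⟩
        · refine List.Pairwise.cons ?_ d5
          intro pe hmem
          have := (d4 pe hmem).1
          show p < pe.1
          omega
      · rw [factorLoop_succ_nodiv fuel m p hcond hmod]
        have hpx : ¬ p ∣ m := fun hd => hmod ((PySem.Int.mod_eq_zero_iff_dvd m p).mpr hd)
        have ihm := ih m (p + 1) h1 (by omega) (by omega)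
          (by
            intro q hq2 hqp hqm
            rcases lt_or_eq_of_le (by omega : q ≤ p) with hlt | rfl
            · exact hnd q hq2 hlt hqm
            · exact hpx hqm)
        obtain ⟨d1, d2, d3, d4, d5⟩ := ihm
        exact ⟨d1, d2, d3, fun pe hmem => ⟨by have := (d4 pe hmem).1; omega, (d4 pe hmem).2.1,
          (d4 pe hmem).2.2.1, (d4 pe hmem).2.2.2⟩, d5⟩
    · rw [factorLoop_succ_exit fuel m p hcond]
      refine ⟨h1, by simp [prodPF], ?_, by simp, by simp⟩
      rcases eq_or_lt_of_le h1 with h1' | h1'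
      · exact Or.inl h1'.symm
      · right
        refine ⟨by omega, fun r hr2 hrm hrdvd => ?_⟩
        obtain ⟨c, hc⟩ := hrdvd
        have hcm : m = r * c := hc
        have hrm' : r < m := hrm
        by_cases hrp : r < p
        · exact hnd r hr2 hrp ⟨c, hcm⟩
        · have hrp' : p ≤ r := by omega
          have hc0 : 0 < c := by nlinarith
          have hcp : c < p := by nlinarith
          have hc2 : 2 ≤ c := by
            by_contra hcon
            have hc1 : c = 1 := by omega
            rw [hc1, mul_one] at hcm
            omega
          exact hnd c hc2 hcp ⟨r, by rw [hcm]; ring⟩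

theorem isPrimeInt_natPrime (q : Int) (hq : IsPrimeInt q) : Nat.Prime q.toNat := by
  obtain ⟨h2, hnd⟩ := hq
  rw [Nat.prime_def_lt]
  refine ⟨by omega, fun r hr hrd => ?_⟩
  by_contra hr1
  have hr0 : r ≠ 0 := by rintro rfl; simp at hrd; omega
  have hr2 : 2 ≤ r := by omega
  have : (r : Int) ∣ q := by
    have := Int.natCast_dvd_natCast.mpr hrd
    rwa [Int.toNat_of_nonneg (by omega)] at this
  exact hnd r (by exact_mod_cast hr2) (by omega) this

theorem isPrimeInt_prime (q : Int) (hq : IsPrimeInt q) : Prime q := by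
  rw [Int.prime_iff_natAbs_prime]
  have h2 := hq.1
  have : q.natAbs = q.toNat := by omega
  rw [this]
  exact isPrimeInt_natPrime q hq

-- two IsPrimeInt's dividing each other are equal
theorem isPrimeInt_dvd_eq (q r : Int) (hq : IsPrimeInt q) (hr : IsPrimeInt r) (h : q ∣ r) :
    q = r := by
  have hle : q ≤ r := Int.le_of_dvd (by have := hr.1; omega) h
  rcases lt_or_eq_of_le hle with hlt | he
  · exact absurd h (hr.2 q hq.1 hlt)
  · exact he

theorem not_dvd_prodPF (q : Int) (hq : IsPrimeInt q) (t : List (Int × Int))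
    (ht : ∀ pe ∈ t, IsPrimeInt pe.1 ∧ q ≠ pe.1) : ¬ q ∣ prodPF t := by
  induction t with
  | nil =>
    intro hd
    have h1 := Int.le_of_dvd (by simp [prodPF]) hd
    simp [prodPF] at h1
    have h2 := hq.1
    omega
  | cons pe t ih =>
    intro hd
    unfold prodPF at hd
    rw [List.map_cons, List.prod_cons] at hd
    rcases (isPrimeInt_prime q hq).dvd_mul.mp hd with h | h
    · have := (isPrimeInt_prime q hq).dvd_of_dvd_pow h
      have heq := isPrimeInt_dvd_eq q pe.1 hq (ht pe List.mem_cons_self).1 this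
      exact (ht pe List.mem_cons_self).2 heq
    · exact ih (fun pe' hm => ht pe' (List.mem_cons_of_mem _ hm)) h

theorem prodPF_pos (t : List (Int × Int)) (ht : ∀ pe ∈ t, IsPrimeInt pe.1) : 0 < prodPF t := by
  induction t with
  | nil => simp [prodPF]
  | cons pe t ih =>
    unfold prodPF
    rw [List.map_cons, List.prod_cons]
    have h1 : 0 < pe.1 := by have := (ht pe List.mem_cons_self).1; omega
    have h2 : 0 < prodPF t := ih (fun pe' hm => ht pe' (List.mem_cons_of_mem _ hm))
    exact mul_pos (pow_pos h1 _) h2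

theorem keyNat (q M : Nat) (hq : Nat.Prime q) (_hM : ¬ q ∣ M) :
    ∀ (E : Nat) (d : Nat), d ∣ q ^ E * M → ∃ i ≤ E, ∃ d', d' ∣ M ∧ d = q ^ i * d' := by
  intro E
  induction E with
  | zero => intro d hd; exact ⟨0, le_refl _, d, by simpa using hd, by simp⟩
  | succ E ih =>
    intro d hd
    by_cases hqd : q ∣ d
    · obtain ⟨c, rfl⟩ := hqd
      have hq0 : q ≠ 0 := hq.ne_zero
      have : c ∣ q ^ E * M := by
        have h1 : q * c ∣ q * (q ^ E * M) := by
          rw [show q * (q ^ E * M) = q ^ (E + 1) * M by ring]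
          exact hd
        exact (mul_dvd_mul_iff_left hq0).mp h1
      obtain ⟨i, hi, d', hd', rfl⟩ := ih c this
      exact ⟨i + 1, by omega, d', hd', by ring⟩
    · have hcop : Nat.Coprime d (q ^ (E + 1)) :=
        Nat.Coprime.pow_right _ (Nat.Coprime.symm ((Nat.Prime.coprime_iff_not_dvd hq).mpr hqd))
      exact ⟨0, by omega, d, Nat.Coprime.dvd_of_dvd_mul_left hcop hd, by simp⟩

theorem keyInt (q M d : Int) (E : Nat) (hq : IsPrimeInt q) (hM : 0 < M) (hnd : ¬ q ∣ M)
    (hd : 0 < d) (h : d ∣ q ^ E * M) :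
    ∃ i : Nat, i ≤ E ∧ ∃ d' : Int, 0 < d' ∧ d' ∣ M ∧ d = q ^ i * d' := by
  have hq2 : 2 ≤ q := hq.1
  have hqn : Nat.Prime q.toNat := isPrimeInt_natPrime q hq
  have hMn : ¬ q.toNat ∣ M.toNat := by
    intro hc
    apply hnd
    have := Int.natCast_dvd_natCast.mpr hc
    rwa [Int.toNat_of_nonneg (by omega), Int.toNat_of_nonneg (by omega)] at this
  have hdn : d.toNat ∣ q.toNat ^ E * M.toNat := by
    have h1 : d.natAbs ∣ (q ^ E * M).natAbs := Int.natAbs_dvd_natAbs.mpr h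
    have h2 : (q ^ E * M).natAbs = q.natAbs ^ E * M.natAbs := by
      rw [Int.natAbs_mul, Int.natAbs_pow]
    rw [h2] at h1
    have e1 : d.natAbs = d.toNat := by omega
    have e2 : q.natAbs = q.toNat := by omega
    have e3 : M.natAbs = M.toNat := by omega
    rwa [e1, e2, e3] at h1
  obtain ⟨i, hi, d', hd', heq⟩ := keyNat q.toNat M.toNat hqn hMn E d.toNat hdn
  refine ⟨i, hi, (d' : Int), ?_, ?_, ?_⟩
  · have hd'0 : d' ≠ 0 := by
      rintro rfl
      simp at heq
      omega
    exact_mod_cast Nat.pos_of_ne_zero hd'0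
  · have := Int.natCast_dvd_natCast.mpr hd'
    rwa [Int.toNat_of_nonneg (by omega)] at this
  · have : ((d.toNat : Nat) : Int) = ((q.toNat ^ i * d' : Nat) : Int) := congrArg (fun x : Nat => (x : Int)) heq
    push_cast at this
    rw [Int.toNat_of_nonneg (by omega), Int.toNat_of_nonneg (by omega)] at this
    exact this

theorem gen_iff (L : List (Int × Int)) (hL : GoodPF L) (d : Int) :
    Gen L d ↔ 0 < d ∧ d ∣ prodPF L := by
  induction L generalizing d with
  | nil =>
    show d = 1 ↔ 0 < d ∧ d ∣ prodPF []
    simp only [prodPF, List.map_nil, List.prod_nil]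
    constructor
    · rintro rfl; exact ⟨one_pos, dvd_refl 1⟩
    · rintro ⟨h1, h2⟩
      rcases Int.isUnit_iff.mp (isUnit_of_dvd_one h2) with h | h
      · exact h
      · omega
  | cons pe t ih =>
    have hgood_t : GoodPF t :=
      ⟨fun pe' hm => hL.1 pe' (List.mem_cons_of_mem _ hm), (List.pairwise_cons.mp hL.2).2⟩
    have hprime : IsPrimeInt pe.1 := (hL.1 pe List.mem_cons_self).1
    have he0 : 0 ≤ pe.2 := (hL.1 pe List.mem_cons_self).2
    have hne : ∀ pe' ∈ t, IsPrimeInt pe'.1 ∧ pe.1 ≠ pe'.1 := by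
      intro pe' hm
      exact ⟨(hgood_t.1 pe' hm).1, (List.pairwise_cons.mp hL.2).1 pe' hm⟩
    have hndvd : ¬ pe.1 ∣ prodPF t := not_dvd_prodPF pe.1 hprime t hne
    have hMpos : 0 < prodPF t := prodPF_pos t (fun pe' hm => (hgood_t.1 pe' hm).1)
    have hprod : prodPF (pe :: t) = pe.1 ^ pe.2.toNat * prodPF t := by
      unfold prodPF; rw [List.map_cons, List.prod_cons]
    constructor
    · rintro ⟨g, hg, i, hi0, hie, rfl⟩
      obtain ⟨hgpos, hgdvd⟩ := ((ih hgood_t) g).mp hg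
      have hq0 : 0 < pe.1 := by have := hprime.1; omega
      refine ⟨mul_pos hgpos (pow_pos hq0 _), ?_⟩
      rw [hprod, mul_comm (pe.1 ^ pe.2.toNat)]
      exact mul_dvd_mul hgdvd (pow_dvd_pow pe.1 (by omega))
    · rintro ⟨hdpos, hddvd⟩
      rw [hprod] at hddvd
      obtain ⟨i, hi, d', hd'pos, hd'dvd, rfl⟩ :=
        keyInt pe.1 (prodPF t) d pe.2.toNat hprime hMpos hndvd hdpos hddvd
      refine ⟨d', ((ih hgood_t) d').mpr ⟨hd'pos, hd'dvd⟩, (i : Int), by omega, by omega, ?_⟩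
      rw [Int.toNat_natCast]
      ring

theorem mem_genFold (L : List (Int × Int)) (S : List Int) (d : Int) :
    d ∈ L.foldl (fun divs pe => divs.flatMap
        (fun d => (PySem.List.pyRange 0 (pe.2 + 1) 1).map (fun i => d * pe.1 ^ i.toNat))) S ↔
      ∃ s ∈ S, ∃ g, Gen L g ∧ d = s * g := by
  induction L generalizing S with
  | nil => simp [Gen]
  | cons pe t ih =>
    rw [List.foldl_cons, ih]
    constructor
    · rintro ⟨s', hs', g', hg', rfl⟩
      rw [List.mem_flatMap] at hs'
      obtain ⟨s, hs, hmap⟩ := hs'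
      rw [List.mem_map] at hmap
      obtain ⟨i, hir, rfl⟩ := hmap
      rw [PySem.List.mem_pyRange_one] at hir
      exact ⟨s, hs, g' * pe.1 ^ i.toNat, ⟨g', hg', i, hir.1, by omega, rfl⟩, by ring⟩
    · rintro ⟨s, hs, g, ⟨g', hg', i, hi0, hie, rfl⟩, rfl⟩
      refine ⟨s * pe.1 ^ i.toNat, ?_, g', hg', by ring⟩
      rw [List.mem_flatMap]
      refine ⟨s, hs, ?_⟩
      rw [List.mem_map]
      exact ⟨i, PySem.List.mem_pyRange_one.mpr ⟨hi0, by omega⟩, rfl⟩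

-- the best-so-far fold: bounded below by the seed, attained at the seed or a qualifying
-- element, and at least every qualifying element
theorem bfold_ge_seed (k : Int) (L : List Int) (s : Int) :
    s ≤ L.foldl (fun b d => if b < d ∧ d ≤ k then d else b) s := by
  induction L generalizing s with
  | nil => simp
  | cons b t ih =>
    rw [List.foldl_cons]
    split_ifs with h
    · exact le_trans (le_of_lt h.1) (ih b)
    · exact ih s

theorem bfold_cases (k : Int) (L : List Int) (s : Int) :
    L.foldl (fun b d => if b < d ∧ d ≤ k then d else b) s = s ∨
      (L.foldl (fun b d => if b < d ∧ d ≤ k then d else b) s ∈ L ∧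
       L.foldl (fun b d => if b < d ∧ d ≤ k then d else b) s ≤ k) := by
  induction L generalizing s with
  | nil => simp
  | cons b t ih =>
    rw [List.foldl_cons]
    split_ifs with h
    · rcases ih b with h1 | h1
      · right; rw [h1]; exact ⟨List.mem_cons_self, h.2⟩
      · right; exact ⟨List.mem_cons_of_mem _ h1.1, h1.2⟩
    · rcases ih s with h1 | h1
      · left; exact h1
      · right; exact ⟨List.mem_cons_of_mem _ h1.1, h1.2⟩

theorem bfold_ge_mem (k : Int) (L : List Int) (s d : Int) (hd : d ∈ L) (hdk : d ≤ k) :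
    d ≤ L.foldl (fun b d => if b < d ∧ d ≤ k then d else b) s := by
  induction L generalizing s with
  | nil => simp at hd
  | cons b t ih =>
    rw [List.foldl_cons]
    rcases List.mem_cons.mp hd with rfl | hd'
    · split_ifs with h
      · exact bfold_ge_seed k t d
      · have hds : d ≤ s := by by_contra hc; exact h ⟨by omega, hdk⟩
        exact le_trans hds (bfold_ge_seed k t s)
    · split_ifs with h <;> exact ih _ hd'

-- proof-side names for the let-bound values of func_alt's else-branch (definitionally equal)
def altPF (n : Int) : List (Int × Int) :=
  if (factorLoop (n + 1).toNat n 2).2 > 1 then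
    (factorLoop (n + 1).toNat n 2).1 ++ [((factorLoop (n + 1).toNat n 2).2, 1)]
  else (factorLoop (n + 1).toNat n 2).1

def altDivs (n : Int) : List Int :=
  (altPF n).foldl
    (fun divs pe => divs.flatMap
      (fun d => (PySem.List.pyRange 0 (pe.2 + 1) 1).map (fun i => d * pe.1 ^ i.toNat))) [1]

def altBest (n k : Int) : Int :=
  (altDivs n).foldl (fun best d => if best < d ∧ d ≤ k then d else best) 1

theorem func_alt_eq (n k : Int) (h : ¬ k ≥ n) :
    func_alt n k = PySem.Int.floordiv n (altBest n k) := by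
  rw [func_alt, if_neg h]
  rfl

theorem goodPF_altPF (n : Int) (hn : 1 ≤ n) : GoodPF (altPF n) ∧ prodPF (altPF n) = n := by
  obtain ⟨c1, c2, c3, c4, c5⟩ := factorLoop_spec (n + 1).toNat n 2 hn (by norm_num)
    (by omega) (by intro q h2 hq; omega)
  unfold altPF
  by_cases hm1 : (factorLoop (n + 1).toNat n 2).2 > 1
  · rw [if_pos hm1]
    have hmfprime : IsPrimeInt (factorLoop (n + 1).toNat n 2).2 := by
      rcases c3 with h1 | h1
      · omega
      · exact h1
    refine ⟨⟨?_, ?_⟩, ?_⟩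
    · intro pe hpe
      rcases List.mem_append.mp hpe with h1 | h1
      · exact ⟨(c4 pe h1).2.2.1, (c4 pe h1).2.1⟩
      · rw [List.mem_singleton] at h1
        rw [h1]
        exact ⟨hmfprime, by norm_num⟩
    · rw [List.pairwise_append]
      refine ⟨List.Pairwise.imp (fun hab => by omega) c5, by simp, ?_⟩
      intro a ha b hb
      rw [List.mem_singleton] at hb
      rw [hb]
      intro hc
      exact (c4 a ha).2.2.2 (hc ▸ dvd_refl a.1)
    · unfold prodPF
      rw [List.map_append, List.prod_append]
      simp only [List.map_cons, List.map_nil, List.prod_cons, List.prod_nil]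
      have : ((1 : Int).toNat) = 1 := rfl
      rw [this, pow_one, mul_one]
      have := c2
      unfold prodPF at this
      rw [mul_comm]
      exact this.symm
  · rw [if_neg hm1]
    have hmf1 : (factorLoop (n + 1).toNat n 2).2 = 1 := by omega
    refine ⟨⟨fun pe hpe => ⟨(c4 pe hpe).2.2.1, (c4 pe hpe).2.1⟩,
      List.Pairwise.imp (fun hab => by omega) c5⟩, ?_⟩
    have := c2
    rw [hmf1, one_mul] at this
    unfold prodPF at this ⊢
    omega

theorem mem_altDivs (n : Int) (hn : 1 ≤ n) (d : Int) :
    d ∈ altDivs n ↔ 0 < d ∧ d ∣ n := by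
  obtain ⟨hgood, hprod⟩ := goodPF_altPF n hn
  unfold altDivs
  rw [mem_genFold]
  constructor
  · rintro ⟨s, hs, g, hg, rfl⟩
    rw [List.mem_singleton] at hs
    rw [hs, one_mul]
    rw [← hprod]
    exact (gen_iff (altPF n) hgood g).mp hg
  · intro hd
    rw [← hprod] at hd
    exact ⟨1, List.mem_singleton_self 1, d, (gen_iff (altPF n) hgood d).mpr hd, (one_mul d).symm⟩

theorem B_eq_div (n k : Int) (hn : 1 ≤ n) (hkn : k < n) : func_alt n k = n / bestD n k := by
  rw [func_alt_eq n k (by omega)]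
  have hb1 : 1 ≤ altBest n k := bfold_ge_seed k (altDivs n) 1
  have hbest : altBest n k = bestD n k := by
    apply le_antisymm
    · rcases bfold_cases k (altDivs n) 1 with h1 | h1
      · rw [altBest, h1]
        exact bestD_pos n k
      · have h2 := (mem_altDivs n hn _).mp h1.1
        exact bestD_ge n k _ (by omega) h2.1 h2.2 h1.2
    · rcases bestD_le_k_or_one n k with h1 | h1
      · rw [h1]; exact hb1
      · exact bfold_ge_mem k (altDivs n) 1 (bestD n k)
          ((mem_altDivs n hn _).mpr ⟨by have := bestD_pos n k; omega, bestD_dvd n k (by omega)⟩) h1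
  rw [hbest, PySem.Int.floordiv_eq_ediv_of_pos (by have := bestD_pos n k; omega)]

-- the n = 0 corner (then k < 0): A's range is empty, B's divisor table is just [1]
theorem zero_case (k : Int) (hk : k < 0) : func 0 k = func_alt 0 k := by
  have h : ¬ k ≥ (0 : Int) := by omega
  have hA : func 0 k = 0 := by
    rw [func_eq_minFold 0 k h]
    have hs : Int.sqrt 0 = 0 := by decide
    rw [hs]
    have h1 : min ((0 : Int) + 1) k = k := min_eq_right (by omega)
    rw [h1, PySem.List.pyRange_neg_one_eq_nil (by omega)]
    simp
  have hB : func_alt 0 k = 0 := by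
    rw [func_alt_eq 0 k h]
    have hd : altDivs 0 = [1] := by decide
    have hb : altBest 0 k = 1 := by
      rw [altBest, hd]
      simp
    rw [hb]
    decide
  rw [hA, hB]

-- ===== VERDICT (by name: the statement is the Claim_ definition above) =====
theorem func_spec : Claim_equal_func := by
  intro n k _ hpre
  unfold Spec_func
  by_cases h : k ≥ n
  · simp [func, func_alt, h]
  · have hn : 0 ≤ n := by rcases hpre with h1 | h1 <;> omega
    rcases lt_or_eq_of_le hn with hn1 | hn0
    · rw [A_eq_div n k (by omega) (by omega), B_eq_div n k (by omega) (by omega)]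
    · subst hn0; exact zero_case k (by omega)
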